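-- pv_equiv track=rewrite | github.com/mch1321/dna-storage-1 | utils.py | burst_score
-- ===== SOURCE A (Python) =====
-- def burst_score(true: str, pred: str) -> int:
--     assert len(true) == len(pred)
--
--     burst = 0
--     score = 0
--
--     for t, p in zip(list(true), list(pred)):
--         if t != p:
--             burst += 1
--             if burst == 2:
--                 score += 2
--             elif burst > 2:
--                 score += 1
--         else:
--             burst = 0
--
--     return score
-- ===== SOURCE B (Python) =====
-- from itertools import groupby
--
--
-- def burst_score(true: str, pred: str) -> int:
--     assert len(true) == len(pred)
--
--     score = 0
--     for key, grp in groupby(t != p for t, p in zip(true, pred)):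
--         if key:
--             length = sum(1 for _ in grp)
--             if length >= 2:
--                 score += length
--     return score
-- ===== Notes on version B (the rewrite author's own statement) =====
-- stated objective: alternative
-- what changed: B replaces A's stateful burst-counter loop by a run-length decomposition: it groups maximal mismatch runs with itertools.groupby and adds each run's full length when it is at least 2 (a run of length L contributes exactly L under A's 2-at-second-plus-1-each rule), 0 for isolated mismatches.
import Mathlib
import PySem

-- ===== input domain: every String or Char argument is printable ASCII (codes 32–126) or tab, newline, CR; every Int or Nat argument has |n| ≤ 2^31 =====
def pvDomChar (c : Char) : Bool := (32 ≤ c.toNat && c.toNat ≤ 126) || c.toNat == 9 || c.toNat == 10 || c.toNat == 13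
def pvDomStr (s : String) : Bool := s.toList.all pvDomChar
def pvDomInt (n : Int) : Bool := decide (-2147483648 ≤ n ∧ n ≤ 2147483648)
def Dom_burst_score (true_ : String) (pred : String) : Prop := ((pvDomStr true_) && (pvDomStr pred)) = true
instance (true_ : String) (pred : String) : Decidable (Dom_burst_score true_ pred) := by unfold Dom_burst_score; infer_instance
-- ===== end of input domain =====

-- B replaces A's stateful burst-counter loop by a run-length decomposition over maximal
-- mismatch runs (groupby): a run of length L contributes L when L ≥ 2, else 0. Objective: alternative.

-- ===== PORT A =====
-- A's loop state: (burst, score); one step per zipped character pair.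
def burstStepA (st : Int × Int) (tp : Char × Char) : Int × Int :=
  if tp.1 ≠ tp.2 then
    let burst := st.1 + 1
    (burst, st.2 + (if burst = 2 then 2 else if burst > 2 then 1 else 0))
  else
    (0, st.2)

def burst_score (true_ : String) (pred : String) : Int :=
  ((List.zip true_.toList pred.toList).foldl burstStepA (0, 0)).2

-- ===== PORT B =====
-- groupby-style walk over maximal runs of the mismatch sequence:
-- take each maximal True run, add its full length when ≥ 2.
def scoreRuns : List Bool → Int
  | [] => 0
  | false :: rest => scoreRuns rest
  | true :: rest =>
      let L : Nat := 1 + (rest.takeWhile id).length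
      (if L ≥ 2 then (L : Int) else 0) + scoreRuns (rest.dropWhile id)
  termination_by l => l.length
  decreasing_by
    · simp
    · have := List.length_dropWhile_le (p := id) (l := rest); simp; omega

def burst_score_alt (true_ : String) (pred : String) : Int :=
  scoreRuns ((List.zip true_.toList pred.toList).map (fun tp => decide (tp.1 ≠ tp.2)))

-- ===== PRECONDITION & SPEC =====
-- Pre_: the assert in both programs; unequal lengths raise AssertionError.
def Pre_burst_score (true_ : String) (pred : String) : Prop :=
  true_.toList.length = pred.toList.length
instance (true_ : String) (pred : String) : Decidable (Pre_burst_score true_ pred) := by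
  unfold Pre_burst_score; infer_instance

def pvWitness_burst_score : String × String := ("ACGT", "AGGA")

def Spec_burst_score (true_ : String) (pred : String) (out : Int) : Prop := out = burst_score_alt true_ pred
instance (true_ : String) (pred : String) (out : Int) : Decidable (Spec_burst_score true_ pred out) := by unfold Spec_burst_score; infer_instance

-- ===== CLAIM (what is proved, stated in full; the proofs are below) =====
def Claim_equal_burst_score : Prop := ∀ (true_ : String) (pred : String), Dom_burst_score true_ pred → Pre_burst_score true_ pred → Spec_burst_score true_ pred (burst_score true_ pred)

-- ===== LEMMAS AND PROOFS =====

-- payoff of a finished mismatch run of length n under A's scoring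
def payoff (n : Nat) : Int := if n ≥ 2 then (n : Int) else 0

-- A's fold restricted to the mismatch booleans
def stepB (st : Int × Int) (b : Bool) : Int × Int :=
  if b then
    let burst := st.1 + 1
    (burst, st.2 + (if burst = 2 then 2 else if burst > 2 then 1 else 0))
  else
    (0, st.2)

lemma foldA_eq_foldB (l : List (Char × Char)) (st : Int × Int) :
    l.foldl burstStepA st = (l.map (fun tp => decide (tp.1 ≠ tp.2))).foldl stepB st := by
  induction l generalizing st with
  | nil => rfl
  | cons x xs ih =>
      simp only [List.foldl, List.map]
      rw [ih]
      congr 1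
      by_cases h : x.1 = x.2 <;> simp [burstStepA, stepB, h]

-- the extra score A's loop accumulates from state burst = k over the remaining booleans
def extra (k : Nat) : List Bool → Int
  | [] => 0
  | false :: rest => extra 0 rest
  | true :: rest =>
      (if k + 1 = 2 then 2 else if k + 1 > 2 then 1 else 0) + extra (k + 1) rest

lemma foldB_snd (bs : List Bool) (k : Nat) (s : Int) :
    (bs.foldl stepB ((k : Int), s)).2 = s + extra k bs := by
  induction bs generalizing k s with
  | nil => simp [extra]
  | cons b rest ih =>
      cases b with
      | false =>
          have h0 : ((0 : Nat) : Int) = 0 := rfl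
          simpa [stepB, extra, h0] using ih 0 s
      | true =>
          have hcast : ((k : Int) + 1) = ((k + 1 : Nat) : Int) := by push_cast; ring
          have h2 : ((k : Int) + 1 = 2) ↔ (k + 1 = 2) := by omega
          have h3 : ((k : Int) + 1 > 2) ↔ (k + 1 > 2) := by omega
          simp only [List.foldl, stepB, extra, if_true, h2, h3]
          rw [hcast, ih (k + 1)]
          ring

lemma scoreRuns_decomp (bs : List Bool) :
    scoreRuns bs = payoff (bs.takeWhile id).length + scoreRuns (bs.dropWhile id) := by
  cases bs with
  | nil => simp [scoreRuns, payoff]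
  | cons b rest =>
      cases b with
      | false => simp [scoreRuns, List.takeWhile, List.dropWhile, payoff]
      | true =>
          simp [scoreRuns, List.takeWhile, List.dropWhile, payoff, Nat.add_comm]

lemma extra_eq (bs : List Bool) (k : Nat) :
    extra k bs = payoff (k + (bs.takeWhile id).length) - payoff k + scoreRuns (bs.dropWhile id) := by
  induction bs generalizing k with
  | nil => simp [extra, scoreRuns]
  | cons b rest ih =>
      cases b with
      | false =>
          have h := ih 0
          simp only [extra, List.takeWhile, List.dropWhile]
          simp only [id]
          simp only [h, Nat.zero_add]
          have hfr : scoreRuns (false :: rest) = scoreRuns rest := by simp [scoreRuns]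
          rw [hfr, scoreRuns_decomp rest]
          simp [payoff]
      | true =>
          have h := ih (k + 1)
          simp only [extra, List.takeWhile, List.dropWhile]
          simp only [id, List.length_cons]
          rw [h]
          have harr : k + 1 + (rest.takeWhile id).length = k + ((rest.takeWhile id).length + 1) := by omega
          rw [harr]
          have hstep : (if k + 1 = 2 then (2 : Int) else if k + 1 > 2 then 1 else 0)
              = payoff (k + 1) - payoff k := by
            unfold payoff
            by_cases h2 : k + 1 = 2
            · simp [h2]; omega
            · by_cases h3 : k + 1 > 2
              · have hk2 : k ≥ 2 := by omega
                simp [h2, h3, hk2]; omega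
              · have hk1 : k + 1 < 2 := by omega
                simp [h2, h3]; omega
          rw [hstep]; ring

lemma foldB_eq_scoreRuns (bs : List Bool) :
    (bs.foldl stepB (0, 0)).2 = scoreRuns bs := by
  have h := foldB_snd bs 0 0
  simp only [Nat.cast_zero] at h
  rw [h, extra_eq bs 0, scoreRuns_decomp bs]
  simp [payoff]

-- ===== VERDICT (by name: the statement is the Claim_ definition above) =====
theorem burst_score_spec : Claim_equal_burst_score := by
  intro true_ pred _ _
  unfold Spec_burst_score burst_score burst_score_alt
  rw [foldA_eq_foldB, foldB_eq_scoreRuns]
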